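-- pv_equiv track=rewrite | github.com/weechinghwa/vqe_pair | Compute/dependencies.py | degenerate_pair_gen
-- ===== SOURCE A (Python) =====
-- def degenerate_pair_gen(num_nucleon_orbitals:"tuple")->"list":
--     # num_nucleon_orbitals: (num_neut_orbitals, num_prot_orbitals)
--     pair = []; quad=[]
--     pair_list=[]; quad_list=[]
--     neut_orbitals_list = list(range(0,num_nucleon_orbitals[0]))
--     prot_orbitals_list = list(range(num_nucleon_orbitals[0], sum(num_nucleon_orbitals)))
--     matching_lvl = min(len(neut_orbitals_list),len(prot_orbitals_list))
--     for i in range(0,matching_lvl):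
--         if len(quad) < 4:
--             quad.extend([neut_orbitals_list[i],prot_orbitals_list[i]])
--         elif len(quad)==4:
--             quad.sort(); quad_list.append((quad))
--             quad = []; quad.extend([neut_orbitals_list[i],prot_orbitals_list[i]])
--     if len(quad)==4:
--         quad.sort(); quad_list.append(list(quad))
--         quad = []; quad.extend([neut_orbitals_list[i],prot_orbitals_list[i]])
--     for quad_dum in quad_list:
--         pair_list = pair_list+list(combinations(quad_dum,2))
--     orbital_list = neut_orbitals_list if len(neut_orbitals_list) > len(prot_orbitals_list) else prot_orbitals_list
--     for index_for_list in range(matching_lvl,len(orbital_list)):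
--         i = orbital_list[index_for_list]
--         if len(pair)==2:
--             pair_list.append(tuple(pair))
--             pair = []; pair.append(i)
--         elif len(pair) < 2:
--             pair.append(i)
--     if len(pair)==2:
--         pair_list.append(tuple(pair))
--         pair = []; pair.append(i)
--     pair_list.sort()
--     return pair_list
-- ===== SOURCE B (Python) =====
-- def degenerate_pair_gen(num_nucleon_orbitals: "tuple") -> "list":
--     # num_nucleon_orbitals: (num_neut_orbitals, num_prot_orbitals)
--     N, P = num_nucleon_orbitals
--     n = max(N, 0)          # len of neutron orbital list range(0, N)
--     p = max(P, 0)          # len of proton orbital list range(N, N + P)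
--     m = min(n, p)          # matching levels
--     res = []
--     # each pair of consecutive matching levels forms the sorted quad
--     # [2j, 2j+1, N+2j, N+2j+1]; a trailing odd matching level is dropped
--     for j in range(m // 2):
--         a, b, c, d = 2 * j, 2 * j + 1, N + 2 * j, N + 2 * j + 1
--         res += [(a, b), (a, c), (a, d), (b, c), (b, d), (c, d)]
--     # remaining levels of the longer list ('>' tie-break picks the proton list),
--     # taken two at a time; a trailing singleton is dropped
--     longer, base = (n, m) if n > p else (p, N + m)
--     for t in range((longer - m) // 2):
--         res.append((base + 2 * t, base + 2 * t + 1))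
--     res.sort()
--     return res
-- ===== Notes on version B (the rewrite author's own statement) =====
-- stated objective: simpler
-- what changed: Replaces A's len-checked running-buffer state machine (quad/pair buffers filled and flushed while iterating over materialized orbital lists) with direct count/index arithmetic: closed-form quads [2j,2j+1,N+2j,N+2j+1] for j < matching_lvl//2 and closed-form remaining pairs, so no orbital lists or buffers are materialized.
-- crash fix: On inputs with min(max(N,0), max(P,0)) >= 2 (stated up to a total orbital count of 8000000, within which B can materialize the result) A raises NameError ('combinations' is not defined: the module never imports itertools.combinations), while B returns the intended pair list with the quad combinations included. — e.g. on degenerate_pair_gen(2, 2): A raises NameError, B returns [(0, 1), (0, 2), (0, 3), (1, 2), (1, 3), (2, 3)]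
import Mathlib
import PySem

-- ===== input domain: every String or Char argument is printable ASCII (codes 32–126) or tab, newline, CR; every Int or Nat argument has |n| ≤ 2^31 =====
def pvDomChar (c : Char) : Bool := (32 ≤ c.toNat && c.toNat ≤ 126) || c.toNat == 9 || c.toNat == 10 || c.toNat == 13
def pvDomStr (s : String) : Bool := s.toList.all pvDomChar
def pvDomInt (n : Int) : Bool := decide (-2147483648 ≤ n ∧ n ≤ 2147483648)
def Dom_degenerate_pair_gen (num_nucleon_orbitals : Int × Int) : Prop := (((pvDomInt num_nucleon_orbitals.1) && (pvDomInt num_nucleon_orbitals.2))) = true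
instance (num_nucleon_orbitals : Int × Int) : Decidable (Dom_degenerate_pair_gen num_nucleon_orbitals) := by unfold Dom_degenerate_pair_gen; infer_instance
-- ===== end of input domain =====

-- B replaces A's len-checked running-buffer state machine by direct index arithmetic
-- (quads [2j,2j+1,N+2j,N+2j+1] and remaining pairs computed in closed form); objective: simpler.

-- ===== PORT A =====
-- list(combinations(l, 2)) with the 2-tuples as pairs (CPython order); exact
def dpgCombs2 : List Int → List (Int × Int)
  | [] => []
  | x :: xs => xs.map (fun y => (x, y)) ++ dpgCombs2 xs

-- tuple(pair) where pair always has exactly 2 elements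
def dpgToPair (l : List Int) : Int × Int := (l.headD 0, (l.drop 1).headD 0)

-- body of A's first loop (quad accumulation); indices are always in range
def dpgStep1 (neut prot : List Int) (st : List Int × List (List Int)) (i : Int) :
    List Int × List (List Int) :=
  if st.1.length < 4 then
    (st.1 ++ [PySem.List.pyGetD neut i 0, PySem.List.pyGetD prot i 0], st.2)
  else if st.1.length = 4 then
    ([PySem.List.pyGetD neut i 0, PySem.List.pyGetD prot i 0],
     st.2 ++ [PySem.List.sorted st.1 (fun x => x) false])
  else st

-- body of A's remaining loop (pair accumulation)
def dpgStep2 (orb : List Int) (st : List Int × List (Int × Int)) (idx : Int) :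
    List Int × List (Int × Int) :=
  let i := PySem.List.pyGetD orb idx 0
  if st.1.length = 2 then ([i], st.2 ++ [dpgToPair st.1])
  else if st.1.length < 2 then (st.1 ++ [i], st.2)
  else st

def degenerate_pair_gen (num_nucleon_orbitals : Int × Int) : List (Int × Int) :=
  let neut := PySem.List.pyRange 0 num_nucleon_orbitals.1 1
  let prot := PySem.List.pyRange num_nucleon_orbitals.1
      (num_nucleon_orbitals.1 + num_nucleon_orbitals.2) 1
  let matching_lvl : Int := min (neut.length : Int) (prot.length : Int)
  let s1 := (PySem.List.pyRange 0 matching_lvl 1).foldl (dpgStep1 neut prot) ([], [])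
  -- final flush of a full quad (Python's dead refill of `quad` afterwards is omitted:
  -- `quad` is never read again)
  let quad_list := if s1.1.length = 4 then s1.2 ++ [PySem.List.sorted s1.1 (fun x => x) false]
                   else s1.2
  let pair_list0 := quad_list.foldl (fun acc q => acc ++ dpgCombs2 q) []
  let orbital_list := if neut.length > prot.length then neut else prot
  let s2 := (PySem.List.pyRange matching_lvl (orbital_list.length : Int) 1).foldl
      (dpgStep2 orbital_list) ([], pair_list0)
  -- final flush of a full pair (dead refill of `pair` omitted likewise)
  let pair_list := if s2.1.length = 2 then s2.2 ++ [dpgToPair s2.1] else s2.2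
  PySem.List.sorted2 pair_list Prod.fst Prod.snd

-- ===== PORT B =====
def degenerate_pair_gen_alt (num_nucleon_orbitals : Int × Int) : List (Int × Int) :=
  let N := num_nucleon_orbitals.1
  let n := max N 0
  let p := max num_nucleon_orbitals.2 0
  let m := min n p
  let res1 := (PySem.List.pyRange 0 (PySem.Int.floordiv m 2) 1).foldl
    (fun acc j =>
      let a := 2*j; let b := 2*j+1; let c := N+2*j; let d := N+2*j+1
      acc ++ [(a, b), (a, c), (a, d), (b, c), (b, d), (c, d)]) []
  let lb := if n > p then (n, m) else (p, N + m)
  let res := (PySem.List.pyRange 0 (PySem.Int.floordiv (lb.1 - m) 2) 1).foldl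
    (fun acc t => acc ++ [(lb.2 + 2*t, lb.2 + 2*t + 1)]) res1
  PySem.List.sorted2 res Prod.fst Prod.snd

-- ===== PRECONDITION & SPEC =====
-- A's module never imports itertools.combinations, so A raises NameError as soon as a
-- quad of matching levels forms, i.e. when min(max(N,0), max(P,0)) >= 2; Pre_ excludes
-- exactly those inputs (A returns normally everywhere else).
def Pre_degenerate_pair_gen (num_nucleon_orbitals : Int × Int) : Prop :=
  min (max num_nucleon_orbitals.1 0) (max num_nucleon_orbitals.2 0) < 2
instance (num_nucleon_orbitals : Int × Int) : Decidable (Pre_degenerate_pair_gen num_nucleon_orbitals) := by unfold Pre_degenerate_pair_gen; infer_instance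

def pvWitness_degenerate_pair_gen : (Int × Int) := (1, 5)

-- On inputs with min(max(N,0), max(P,0)) >= 2, A raises NameError (the module is missing
-- 'from itertools import combinations'); B returns the intended pair list, quad combinations
-- included. The region is stated up to a total orbital count of 8000000, within which B can
-- materialize the full pair list.
def Raises_degenerate_pair_gen (num_nucleon_orbitals : Int × Int) : Prop :=
  2 ≤ min (max num_nucleon_orbitals.1 0) (max num_nucleon_orbitals.2 0) ∧
  max num_nucleon_orbitals.1 0 + max num_nucleon_orbitals.2 0 ≤ 8000000
instance (num_nucleon_orbitals : Int × Int) : Decidable (Raises_degenerate_pair_gen num_nucleon_orbitals) := by unfold Raises_degenerate_pair_gen; infer_instance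

def pvRaiseWitness_degenerate_pair_gen : (Int × Int) := (2, 2)
def pvRaiseWitnessOut_degenerate_pair_gen : List (Int × Int) :=
  [(0, 1), (0, 2), (0, 3), (1, 2), (1, 3), (2, 3)]

def Spec_degenerate_pair_gen (num_nucleon_orbitals : Int × Int) (out : List (Int × Int)) : Prop := out = degenerate_pair_gen_alt num_nucleon_orbitals
instance (num_nucleon_orbitals : Int × Int) (out : List (Int × Int)) : Decidable (Spec_degenerate_pair_gen num_nucleon_orbitals out) := by unfold Spec_degenerate_pair_gen; infer_instance

-- ===== CLAIM (what is proved, stated in full; the proofs are below) =====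
def Claim_equal_degenerate_pair_gen : Prop := ∀ (num_nucleon_orbitals : Int × Int), Dom_degenerate_pair_gen num_nucleon_orbitals → Pre_degenerate_pair_gen num_nucleon_orbitals → Spec_degenerate_pair_gen num_nucleon_orbitals (degenerate_pair_gen num_nucleon_orbitals)

def Claim_raises_degenerate_pair_gen : Prop := (∀ (num_nucleon_orbitals : Int × Int), Dom_degenerate_pair_gen num_nucleon_orbitals → Raises_degenerate_pair_gen num_nucleon_orbitals → ¬ Pre_degenerate_pair_gen num_nucleon_orbitals) ∧ (Dom_degenerate_pair_gen (pvRaiseWitness_degenerate_pair_gen) ∧ Raises_degenerate_pair_gen (pvRaiseWitness_degenerate_pair_gen) ∧ degenerate_pair_gen_alt (pvRaiseWitness_degenerate_pair_gen) = pvRaiseWitnessOut_degenerate_pair_gen)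

-- ===== LEMMAS AND PROOFS =====

-- xs[i] for a range list
def dpgG (xs : List Int) (i : Int) : Int := PySem.List.pyGetD xs i 0

-- state of loop 1 after k iterations
def dpgRem1 (neut prot : List Int) (k : Nat) : List Int :=
  if k = 0 then []
  else if k % 2 = 1 then [dpgG neut ((k : Int) - 1), dpgG prot ((k : Int) - 1)]
  else [dpgG neut ((k : Int) - 2), dpgG prot ((k : Int) - 2),
        dpgG neut ((k : Int) - 1), dpgG prot ((k : Int) - 1)]

-- number of flushed quads / pairs after k iterations (before the final flush)
def dpgQ (k : Nat) : Nat := if k % 2 = 0 ∧ k ≠ 0 then k / 2 - 1 else k / 2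

def dpgQuadOf (neut prot : List Int) (j : Nat) : List Int :=
  PySem.List.sorted [dpgG neut (2*j), dpgG prot (2*j), dpgG neut (2*j+1), dpgG prot (2*j+1)]
    (fun x => x) false

-- state of loop 2 after k iterations
def dpgRem2 (orb : List Int) (m : Int) (k : Nat) : List Int :=
  if k = 0 then []
  else if k % 2 = 1 then [dpgG orb (m + k - 1)]
  else [dpgG orb (m + k - 2), dpgG orb (m + k - 1)]

def dpgPairOf (orb : List Int) (m : Int) (s : Nat) : Int × Int :=
  (dpgG orb (m + 2*s), dpgG orb (m + 2*s + 1))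

lemma dpg_loop1 (neut prot : List Int) (k : Nat) :
    (PySem.List.pyRange 0 (k : Int) 1).foldl (dpgStep1 neut prot) ([], []) =
      (dpgRem1 neut prot k, (List.range (dpgQ k)).map (dpgQuadOf neut prot)) := by
  induction k with
  | zero => simp [PySem.List.pyRange_one_eq_nil, dpgRem1, dpgQ]
  | succ k ih =>
    rw [show ((k+1 : Nat) : Int) = (k : Int) + 1 by push_cast; ring,
        PySem.List.pyRange_one_succ_right (by positivity), List.foldl_append, ih]
    rcases Nat.eq_zero_or_pos k with rfl | hk
    · have h1 : dpgRem1 neut prot 1 = [dpgG neut ((1:Nat) - 1 : Int), dpgG prot ((1:Nat) - 1 : Int)] := by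
        unfold dpgRem1; rw [if_neg (by omega), if_pos (by omega)]
      have hq : dpgQ 0 = 0 := rfl
      have hq1 : dpgQ 1 = 0 := rfl
      rw [hq, hq1, h1]
      simp [dpgRem1, dpgStep1, dpgG]
    rcases Nat.even_or_odd k with ⟨t, rfl⟩ | ⟨t, rfl⟩
    · -- k = t + t, t ≥ 1: quad is full, flush
      have ht : 1 ≤ t := by omega
      have h4 : dpgRem1 neut prot (t+t) =
          [dpgG neut (((t+t : Nat) : Int) - 2), dpgG prot (((t+t : Nat) : Int) - 2),
           dpgG neut (((t+t : Nat) : Int) - 1), dpgG prot (((t+t : Nat) : Int) - 1)] := by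
        unfold dpgRem1; rw [if_neg (by omega), if_neg (by omega)]
      have h2 : dpgRem1 neut prot (t+t+1) =
          [dpgG neut (((t+t+1 : Nat) : Int) - 1), dpgG prot (((t+t+1 : Nat) : Int) - 1)] := by
        unfold dpgRem1; rw [if_neg (by omega), if_pos (by omega)]
      have hq : dpgQ (t+t) = t - 1 := by unfold dpgQ; rw [if_pos (by omega)]; omega
      have hq' : dpgQ (t+t+1) = t := by unfold dpgQ; rw [if_neg (by omega)]; omega
      rw [h4, h2, hq, hq']
      simp only [List.foldl_cons, List.foldl_nil, dpgStep1, List.length_cons, List.length_nil]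
      rw [if_neg (by norm_num)]; rw [if_pos trivial]
      have e0 : ((t+t+1 : Nat) : Int) - 1 = ((t+t : Nat) : Int) := by push_cast; ring
      rw [Prod.mk.injEq]
      constructor
      · rw [e0]; simp [dpgG]
      · rw [show List.range t = List.range (t-1) ++ [t-1] by
              rw [← List.range_succ]; congr 1; omega,
           List.map_append]
        congr 1
        simp only [dpgQuadOf, List.map_cons, List.map_nil]
        congr <;> omega
    · -- k = 2t+1: quad has 2 elements, extend
      have h2 : dpgRem1 neut prot (2*t+1) =
          [dpgG neut (((2*t+1 : Nat) : Int) - 1), dpgG prot (((2*t+1 : Nat) : Int) - 1)] := by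
        unfold dpgRem1; rw [if_neg (by omega), if_pos (by omega)]
      have h4 : dpgRem1 neut prot (2*t+1+1) =
          [dpgG neut (((2*t+1+1 : Nat) : Int) - 2), dpgG prot (((2*t+1+1 : Nat) : Int) - 2),
           dpgG neut (((2*t+1+1 : Nat) : Int) - 1), dpgG prot (((2*t+1+1 : Nat) : Int) - 1)] := by
        unfold dpgRem1; rw [if_neg (by omega), if_neg (by omega)]
      have hq : dpgQ (2*t+1) = t := by unfold dpgQ; rw [if_neg (by omega)]; omega
      have hq' : dpgQ (2*t+1+1) = t := by unfold dpgQ; rw [if_pos (by omega)]; omega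
      rw [h2, h4, hq, hq']
      simp only [List.foldl_cons, List.foldl_nil, dpgStep1, List.length_cons, List.length_nil]
      rw [if_pos (by norm_num)]
      have e1 : ((2*t+1+1 : Nat) : Int) - 2 = ((2*t+1 : Nat) : Int) - 1 := by push_cast; ring
      have e2 : ((2*t+1+1 : Nat) : Int) - 1 = ((2*t+1 : Nat) : Int) := by push_cast; ring
      rw [Prod.mk.injEq]
      constructor
      · rw [e1, e2]; simp [dpgG]
      · rfl

lemma dpg_loop2 (orb : List Int) (m : Int) (pl0 : List (Int × Int)) (k : Nat) :
    (PySem.List.pyRange m (m + (k : Int)) 1).foldl (dpgStep2 orb) ([], pl0) =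
      (dpgRem2 orb m k, pl0 ++ (List.range (dpgQ k)).map (dpgPairOf orb m)) := by
  induction k with
  | zero => simp [PySem.List.pyRange_one_eq_nil, dpgRem2, dpgQ]
  | succ k ih =>
    rw [show m + ((k+1 : Nat) : Int) = (m + (k : Int)) + 1 by push_cast; ring,
        PySem.List.pyRange_one_succ_right (by omega), List.foldl_append, ih]
    rcases Nat.eq_zero_or_pos k with rfl | hk
    · have h1 : dpgRem2 orb m 1 = [dpgG orb (m + (1:Nat) - 1)] := by
        unfold dpgRem2; rw [if_neg (by omega), if_pos (by omega)]
      rw [h1, show dpgQ 0 = 0 from rfl, show dpgQ 1 = 0 from rfl]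
      simp [dpgRem2, dpgStep2, dpgG]
    rcases Nat.even_or_odd k with ⟨t, rfl⟩ | ⟨t, rfl⟩
    · -- k = t + t, t ≥ 1: pair is full, flush
      have ht : 1 ≤ t := by omega
      have h4 : dpgRem2 orb m (t+t) =
          [dpgG orb (m + ((t+t : Nat) : Int) - 2), dpgG orb (m + ((t+t : Nat) : Int) - 1)] := by
        unfold dpgRem2; rw [if_neg (by omega), if_neg (by omega)]
      have h2 : dpgRem2 orb m (t+t+1) = [dpgG orb (m + ((t+t+1 : Nat) : Int) - 1)] := by
        unfold dpgRem2; rw [if_neg (by omega), if_pos (by omega)]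
      have hq : dpgQ (t+t) = t - 1 := by unfold dpgQ; rw [if_pos (by omega)]; omega
      have hq' : dpgQ (t+t+1) = t := by unfold dpgQ; rw [if_neg (by omega)]; omega
      rw [h4, h2, hq, hq']
      simp only [List.foldl_cons, List.foldl_nil, dpgStep2, List.length_cons, List.length_nil]
      rw [if_pos trivial, Prod.mk.injEq]
      constructor
      · simp only [dpgG, List.cons.injEq, and_true]
        congr 1; push_cast; ring
      · rw [show List.range t = List.range (t-1) ++ [t-1] by
              rw [← List.range_succ]; congr 1; omega,
           List.map_append, ← List.append_assoc]
        congr 1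
        simp only [dpgPairOf, dpgToPair, List.map_cons, List.map_nil, List.headD, List.drop]
        congr <;> simp [dpgG] <;> congr 1 <;> omega
    · -- k = 2t+1: pair has one element, append
      have h1 : dpgRem2 orb m (2*t+1) = [dpgG orb (m + ((2*t+1 : Nat) : Int) - 1)] := by
        unfold dpgRem2; rw [if_neg (by omega), if_pos (by omega)]
      have h2 : dpgRem2 orb m (2*t+1+1) =
          [dpgG orb (m + ((2*t+1+1 : Nat) : Int) - 2), dpgG orb (m + ((2*t+1+1 : Nat) : Int) - 1)] := by
        unfold dpgRem2; rw [if_neg (by omega), if_neg (by omega)]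
      have hq : dpgQ (2*t+1) = t := by unfold dpgQ; rw [if_neg (by omega)]; omega
      have hq' : dpgQ (2*t+1+1) = t := by unfold dpgQ; rw [if_pos (by omega)]; omega
      rw [h1, h2, hq, hq']
      simp only [List.foldl_cons, List.foldl_nil, dpgStep2, List.length_cons, List.length_nil]
      rw [if_neg (by norm_num), if_pos (by norm_num), Prod.mk.injEq]
      constructor
      · simp only [dpgG, List.cons_append, List.nil_append]
        have e1 : m + ((2*t+1+1 : Nat) : Int) - 2 = m + ((2*t+1 : Nat) : Int) - 1 := by
          push_cast; ring
        have e2 : m + ((2*t+1+1 : Nat) : Int) - 1 = m + ((2*t+1 : Nat) : Int) := by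
          push_cast; ring
        rw [e1, e2]
      · rfl

lemma dpg_quads (neut prot : List Int) (k : Nat) :
    (if ((PySem.List.pyRange 0 (k : Int) 1).foldl (dpgStep1 neut prot) ([], [])).1.length = 4
     then ((PySem.List.pyRange 0 (k : Int) 1).foldl (dpgStep1 neut prot) ([], [])).2 ++
          [PySem.List.sorted ((PySem.List.pyRange 0 (k : Int) 1).foldl (dpgStep1 neut prot) ([], [])).1 (fun x => x) false]
     else ((PySem.List.pyRange 0 (k : Int) 1).foldl (dpgStep1 neut prot) ([], [])).2) =
      (List.range (k / 2)).map (dpgQuadOf neut prot) := by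
  rw [dpg_loop1]
  rcases Nat.eq_zero_or_pos k with rfl | hk
  · simp [dpgRem1, dpgQ]
  rcases Nat.even_or_odd k with ⟨t, rfl⟩ | ⟨t, rfl⟩
  · have ht : 1 ≤ t := by omega
    have h4 : dpgRem1 neut prot (t+t) =
        [dpgG neut (((t+t : Nat) : Int) - 2), dpgG prot (((t+t : Nat) : Int) - 2),
         dpgG neut (((t+t : Nat) : Int) - 1), dpgG prot (((t+t : Nat) : Int) - 1)] := by
      unfold dpgRem1; rw [if_neg (by omega), if_neg (by omega)]
    have hq : dpgQ (t+t) = t - 1 := by unfold dpgQ; rw [if_pos (by omega)]; omega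
    rw [h4, hq, if_pos (by norm_num)]
    rw [show (t+t) / 2 = (t-1) + 1 by omega, List.range_succ, List.map_append]
    congr 1
    simp only [dpgQuadOf, List.map_cons, List.map_nil]
    congr <;> omega
  · have h2 : dpgRem1 neut prot (2*t+1) =
        [dpgG neut (((2*t+1 : Nat) : Int) - 1), dpgG prot (((2*t+1 : Nat) : Int) - 1)] := by
      unfold dpgRem1; rw [if_neg (by omega), if_pos (by omega)]
    have hq : dpgQ (2*t+1) = t := by unfold dpgQ; rw [if_neg (by omega)]; omega
    have he : (2*t+1)/2 = t := by omega
    rw [h2, if_neg (by norm_num), hq, he]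

lemma dpg_pairs (orb : List Int) (m : Int) (pl0 : List (Int × Int)) (k : Nat) :
    (if ((PySem.List.pyRange m (m + (k : Int)) 1).foldl (dpgStep2 orb) ([], pl0)).1.length = 2
     then ((PySem.List.pyRange m (m + (k : Int)) 1).foldl (dpgStep2 orb) ([], pl0)).2 ++
          [dpgToPair ((PySem.List.pyRange m (m + (k : Int)) 1).foldl (dpgStep2 orb) ([], pl0)).1]
     else ((PySem.List.pyRange m (m + (k : Int)) 1).foldl (dpgStep2 orb) ([], pl0)).2) =
      pl0 ++ (List.range (k / 2)).map (dpgPairOf orb m) := by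
  rw [dpg_loop2]
  rcases Nat.eq_zero_or_pos k with rfl | hk
  · simp [dpgRem2, dpgQ]
  rcases Nat.even_or_odd k with ⟨t, rfl⟩ | ⟨t, rfl⟩
  · have ht : 1 ≤ t := by omega
    have h4 : dpgRem2 orb m (t+t) =
        [dpgG orb (m + ((t+t : Nat) : Int) - 2), dpgG orb (m + ((t+t : Nat) : Int) - 1)] := by
      unfold dpgRem2; rw [if_neg (by omega), if_neg (by omega)]
    have hq : dpgQ (t+t) = t - 1 := by unfold dpgQ; rw [if_pos (by omega)]; omega
    rw [h4, hq, if_pos (by norm_num)]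
    rw [show (t+t) / 2 = (t-1) + 1 by omega, List.range_succ, List.map_append, ← List.append_assoc]
    congr 1
    simp only [dpgPairOf, dpgToPair, List.map_cons, List.map_nil, List.headD, List.drop]
    congr <;> simp [dpgG] <;> congr 1 <;> omega
  · have h1 : dpgRem2 orb m (2*t+1) = [dpgG orb (m + ((2*t+1 : Nat) : Int) - 1)] := by
      unfold dpgRem2; rw [if_neg (by omega), if_pos (by omega)]
    have hq : dpgQ (2*t+1) = t := by unfold dpgQ; rw [if_neg (by omega)]; omega
    have he : (2*t+1)/2 = t := by omega
    rw [h1, if_neg (by norm_num), hq, he]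

lemma dpg_get (a b i : Int) (h0 : 0 ≤ i) (h : i < b - a) :
    dpgG (PySem.List.pyRange a b 1) i = a + i := by
  unfold dpgG
  rw [PySem.List.pyGetD_eq_getElem _ 0 h0 (by rw [PySem.List.length_pyRange_one]; omega),
      PySem.List.getElem_pyRange_one]
  omega

lemma dpg_quad_item (N P : Int) (k1 : Nat) (hk1n : (k1:Int) ≤ N) (hk1p : (k1:Int) ≤ P)
    (j : Nat) (hj : j < k1/2) :
    dpgCombs2 (dpgQuadOf (PySem.List.pyRange 0 N 1) (PySem.List.pyRange N (N+P) 1) j) =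
      [(2*(j:Int), 2*(j:Int)+1), (2*(j:Int), N+2*(j:Int)), (2*(j:Int), N+2*(j:Int)+1),
       (2*(j:Int)+1, N+2*(j:Int)), (2*(j:Int)+1, N+2*(j:Int)+1),
       (N+2*(j:Int), N+2*(j:Int)+1)] := by
  have hb : 2*(j:Int)+1 < (k1:Int) := by omega
  unfold dpgQuadOf
  have e1 : dpgG (PySem.List.pyRange 0 N 1) (2*(j:Int)) = 2*(j:Int) := by
    rw [dpg_get 0 N _ (by positivity) (by omega)]; ring
  have e2 : dpgG (PySem.List.pyRange N (N+P) 1) (2*(j:Int)) = N + 2*(j:Int) := by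
    rw [dpg_get N (N+P) _ (by positivity) (by omega)]
  have e3 : dpgG (PySem.List.pyRange 0 N 1) (2*(j:Int)+1) = 2*(j:Int)+1 := by
    rw [dpg_get 0 N _ (by positivity) (by omega)]; ring
  have e4 : dpgG (PySem.List.pyRange N (N+P) 1) (2*(j:Int)+1) = N + 2*(j:Int)+1 := by
    rw [dpg_get N (N+P) _ (by positivity) (by omega)]; ring
  rw [e1, e2, e3, e4]
  rw [PySem.List.sorted_id_eq_of_perm_of_pairwise _
      [2*(j:Int), 2*(j:Int)+1, N+2*(j:Int), N+2*(j:Int)+1]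
      (List.Perm.cons _ (List.Perm.swap _ _ _))
      (by simp [List.pairwise_cons]; omega)]
  simp [dpgCombs2]

lemma dpg_pair_item (a b mI : Int) (s : Nat) (h0 : 0 ≤ mI)
    (h : mI + 2*(s:Int) + 1 < b - a) :
    dpgPairOf (PySem.List.pyRange a b 1) mI s =
      (a + mI + 2*(s:Int), a + mI + 2*(s:Int) + 1) := by
  unfold dpgPairOf
  rw [dpg_get a b _ (by omega) (by omega), dpg_get a b _ (by omega) (by omega)]
  rw [Prod.mk.injEq]
  constructor <;> ring

lemma dpg_main (N P : Int) :
    degenerate_pair_gen (N, P) = degenerate_pair_gen_alt (N, P) := by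
  unfold degenerate_pair_gen degenerate_pair_gen_alt
  simp only [PySem.List.length_pyRange_one]
  have ha : ((N : Int) - 0).toNat = N.toNat := by norm_num
  have hb : ((N : Int) + P - N).toNat = P.toNat := by rw [add_sub_cancel_left]
  rw [ha, hb]
  set k1 := min N.toNat P.toNat with hk1def
  have hmin : min ((N.toNat : Nat) : Int) ((P.toNat : Nat) : Int) = (k1 : Int) := by omega
  have hmB : min (max N 0) (max P 0) = (k1 : Int) := by omega
  rw [hmin, hmB]
  congr 1
  rw [dpg_quads, PySem.List.foldl_append_eq_flatMap, List.nil_append]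
  have hf1 : PySem.Int.floordiv (k1 : Int) 2 = ((k1/2 : Nat) : Int) := by
    exact_mod_cast PySem.Int.floordiv_natCast k1 2
  rw [hf1, PySem.List.pyRange_zero_natCast]
  rw [PySem.List.foldl_append_singleton_eq_map]
  rw [PySem.List.foldl_append_eq_flatMap, List.nil_append]
  simp only [List.flatMap_map]
  have hquad : (List.range (k1/2)).flatMap
        (fun j => dpgCombs2 (dpgQuadOf (PySem.List.pyRange 0 N 1) (PySem.List.pyRange N (N+P) 1) j)) =
      (List.range (k1/2)).flatMap (fun (j : Nat) =>
        [(2*(j:Int), 2*(j:Int)+1), (2*(j:Int), N+2*(j:Int)), (2*(j:Int), N+2*(j:Int)+1),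
         (2*(j:Int)+1, N+2*(j:Int)), (2*(j:Int)+1, N+2*(j:Int)+1),
         (N+2*(j:Int), N+2*(j:Int)+1)]) := by
    refine List.flatMap_congr ?_
    intro j hj
    rw [List.mem_range] at hj
    exact dpg_quad_item N P k1 (by omega) (by omega) j hj
  by_cases hc : N.toNat > P.toNat
  · rw [if_pos hc, if_pos (show max N 0 > max P 0 by omega)]
    simp only [PySem.List.length_pyRange_one]
    rw [ha]
    set k2 := N.toNat - k1 with hk2def
    have hLb : ((N.toNat : Nat) : Int) = (k1:Int) + (k2:Int) := by omega
    rw [hLb, dpg_pairs]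
    have hd : max N 0 - (k1 : Int) = (k2 : Int) := by omega
    have hf2 : PySem.Int.floordiv (k2 : Int) 2 = ((k2/2 : Nat) : Int) := by
      exact_mod_cast PySem.Int.floordiv_natCast k2 2
    rw [hd, hf2, PySem.List.pyRange_zero_natCast]
    simp only [List.map_map]
    rw [hquad]
    congr 1
    refine List.map_congr_left ?_
    intro s hs
    rw [List.mem_range] at hs
    rw [dpg_pair_item 0 N (k1:Int) s (by positivity) (by omega)]
    simp only [Function.comp_apply]
    rw [Prod.mk.injEq]
    constructor <;> ring
  · rw [if_neg hc, if_neg (show ¬ (max N 0 > max P 0) by omega)]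
    simp only [PySem.List.length_pyRange_one]
    rw [hb]
    set k2 := P.toNat - k1 with hk2def
    have hLb : ((P.toNat : Nat) : Int) = (k1:Int) + (k2:Int) := by omega
    rw [hLb, dpg_pairs]
    have hd : max P 0 - (k1 : Int) = (k2 : Int) := by omega
    have hf2 : PySem.Int.floordiv (k2 : Int) 2 = ((k2/2 : Nat) : Int) := by
      exact_mod_cast PySem.Int.floordiv_natCast k2 2
    rw [hd, hf2, PySem.List.pyRange_zero_natCast]
    simp only [List.map_map]
    rw [hquad]
    congr 1
    refine List.map_congr_left ?_
    intro s hs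
    rw [List.mem_range] at hs
    rw [dpg_pair_item N (N+P) (k1:Int) s (by positivity) (by omega)]
    simp only [Function.comp_apply]

-- ===== VERDICT (by name: the statement is the Claim_ definition above) =====
theorem degenerate_pair_gen_spec : Claim_equal_degenerate_pair_gen := by
  intro nn _ _
  obtain ⟨N, P⟩ := nn
  unfold Spec_degenerate_pair_gen
  exact dpg_main N P

@[simp]
theorem degenerate_pair_gen_raises : Claim_raises_degenerate_pair_gen := by
  unfold Claim_raises_degenerate_pair_gen
  refine ⟨?_, by decide⟩
  intro nn _ h hp
  unfold Raises_degenerate_pair_gen at h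
  unfold Pre_degenerate_pair_gen at hp
  omega
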